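-- pv_equiv track=rewrite | github.com/GuillermoFY/PythonDEMOS | MY-DEMOS/Sample 03 - Combo Counter/activity03.py | comboNum
-- ===== SOURCE A (Python) =====
-- def comboNum(st):
--
--     #First, we are using the function count() that return the number of times that the value 01, ABC and HO appears in the string parameter
--     comboCounter = 0
--     comboCounter += st.count("01")
--     comboCounter += st.count("ABC")
--     comboCounter += st.count("HO")
--
--     #we are saving all the letters in an array for searching if there is some 00 combo
--     letters = list(st)
--
--     """
--         now, we go through the list and we see if there is some 00 combos, if there is some,
--         the comboCounter will +1 and the zeroDouble will pass to be a 0 because if there is some 000 the counter will be 2 (000=2)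
--     """
--     zeroDouble = ""
--     for i in letters:
--         zeroDouble += i
--         if(i!="0"):
--             zeroDouble = ""
--         if(zeroDouble=="00"):
--             comboCounter+=1
--             zeroDouble = "0"
--
--
--     return comboCounter
-- ===== SOURCE B (Python) =====
-- def comboNum(st):
--     # one pass: at each index test whether any of the four combos starts there
--     total = 0
--     for i in range(len(st)):
--         if (st.startswith("01", i) or st.startswith("ABC", i)
--                 or st.startswith("HO", i) or st.startswith("00", i)):
--             total += 1
--     return total
-- ===== Notes on version B (the rewrite author's own statement) =====
-- stated objective: alternative
-- what changed: replaces three separate str.count scans plus a zeroDouble buffer state machine by a single pass that, at each index, tests whether one of the four (mutually exclusive) patterns starts there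
import Mathlib
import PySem

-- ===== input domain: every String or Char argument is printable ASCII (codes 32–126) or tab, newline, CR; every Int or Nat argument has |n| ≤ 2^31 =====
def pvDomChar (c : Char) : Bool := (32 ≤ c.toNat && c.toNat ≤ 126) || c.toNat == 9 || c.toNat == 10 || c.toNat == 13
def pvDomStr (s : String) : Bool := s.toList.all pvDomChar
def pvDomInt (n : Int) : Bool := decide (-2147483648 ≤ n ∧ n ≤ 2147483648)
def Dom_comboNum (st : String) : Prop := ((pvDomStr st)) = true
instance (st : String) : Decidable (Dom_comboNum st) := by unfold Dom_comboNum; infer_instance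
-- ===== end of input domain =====

-- B replaces A's three str.count scans plus the zeroDouble buffer state machine by one
-- pass that tests, at each index, whether one of the four patterns starts there (alternative).


-- ===== PORT A =====
-- the body of A's 'for i in letters' loop (state = (comboCounter, zeroDouble))
def pvStepA (s : Int × List Char) (i : Char) : Int × List Char :=
  let zd := s.2 ++ [i]
  let zd := if i ≠ '0' then ([] : List Char) else zd
  if zd = ['0', '0'] then (s.1 + 1, ['0']) else (s.1, zd)

def comboNum (st : String) : Int :=
  let comboCounter : Int := 0
  let comboCounter := comboCounter + (PySem.Str.count st "01" : Int)
  let comboCounter := comboCounter + (PySem.Str.count st "ABC" : Int)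
  let comboCounter := comboCounter + (PySem.Str.count st "HO" : Int)
  let letters := st.toList
  (letters.foldl pvStepA (comboCounter, ([] : List Char))).1

-- ===== PORT B =====
-- st.startswith(p, i) with 0 ≤ i ≤ len(st) is exactly a prefix test on the suffix from i:
-- ported as PySem.Chars.startswith (st.toList.drop i.toNat) p (i comes from range(len(st)), so i ≥ 0).
def comboNum_alt (st : String) : Int :=
  (PySem.List.pyRange 0 (PySem.Str.len st) 1).foldl
    (fun tot i =>
      if PySem.Chars.startswith (st.toList.drop i.toNat) ['0', '1']
          || PySem.Chars.startswith (st.toList.drop i.toNat) ['A', 'B', 'C']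
          || PySem.Chars.startswith (st.toList.drop i.toNat) ['H', 'O']
          || PySem.Chars.startswith (st.toList.drop i.toNat) ['0', '0']
      then tot + 1 else tot) 0

-- ===== PRECONDITION & SPEC =====
def Spec_comboNum (st : String) (out : Int) : Prop := out = comboNum_alt st
instance (st : String) (out : Int) : Decidable (Spec_comboNum st out) := by unfold Spec_comboNum; infer_instance

-- ===== CLAIM (what is proved, stated in full; the proofs are below) =====
def Claim_equal_comboNum : Prop := ∀ (st : String), Dom_comboNum st → Spec_comboNum st (comboNum st)

-- ===== LEMMAS AND PROOFS =====

-- number of indices at which pattern p starts in cs (overlapping occurrences)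
def pvOcc (p : List Char) : List Char → Nat
  | [] => 0
  | c :: t => (if p.isPrefixOf (c :: t) then 1 else 0) + pvOcc p t

-- B's per-index test
def pvTest (l : List Char) : Bool :=
  PySem.Chars.startswith l ['0', '1'] || PySem.Chars.startswith l ['A', 'B', 'C']
    || PySem.Chars.startswith l ['H', 'O'] || PySem.Chars.startswith l ['0', '0']

def pvOccAll : List Char → Nat
  | [] => 0
  | c :: t => (if pvTest (c :: t) then 1 else 0) + pvOccAll t

-- A's zeroDouble loop, as a recursion on the characters (b = "previous char was '0'")
def pvZ : List Char → Bool → Int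
  | [], _ => 0
  | c :: t, b => (if b ∧ c = '0' then 1 else 0) + pvZ t (c == '0')

lemma pv_go_eq (sub : List Char) (hne : sub ≠ [])
    (H : ∀ l, sub.isPrefixOf l = true → pvOcc sub l = 1 + pvOcc sub (l.drop sub.length)) :
    ∀ (fuel : Nat) (l : List Char) (acc : Nat), l.length ≤ fuel →
      PySem.Chars.count.go sub fuel l acc = acc + pvOcc sub l := by
  intro fuel
  induction fuel with
  | zero =>
      intro l acc hl
      have : l = [] := by cases l <;> simp_all
      subst this
      simp [PySem.Chars.count.go, pvOcc]
  | succ f ih =>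
      intro l acc hl
      cases l with
      | nil => simp [PySem.Chars.count.go, pvOcc]
      | cons h t =>
          rw [PySem.Chars.count.go]
          by_cases hp : sub.isPrefixOf (h :: t) = true
          · rw [if_pos hp, ih]
            · rw [H _ hp]; omega
            · have h1 : 1 ≤ sub.length := by cases sub <;> simp_all
              have := List.length_drop (l := h :: t) (i := sub.length)
              simp at hl ⊢
              omega
          · rw [if_neg hp, ih _ _ (by simp at hl; omega)]
            simp [pvOcc, hp]

lemma pv_count_eq (sub : List Char) (hne : sub ≠ [])
    (H : ∀ l, sub.isPrefixOf l = true → pvOcc sub l = 1 + pvOcc sub (l.drop sub.length)) (cs : List Char) :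
    PySem.Chars.count cs sub = pvOcc sub cs := by
  have : sub.isEmpty = false := by cases sub <;> simp_all
  rw [PySem.Chars.count, this]
  simpa using pv_go_eq sub hne H cs.length cs 0 le_rfl

lemma pv_H2 (a b : Char) (hab : a ≠ b) :
    ∀ l, [a, b].isPrefixOf l = true → pvOcc [a, b] l = 1 + pvOcc [a, b] (l.drop 2) := by
  intro l hp
  match l with
  | [] => simp [List.isPrefixOf] at hp
  | [x] => simp [List.isPrefixOf] at hp
  | x :: y :: r =>
      simp [List.isPrefixOf] at hp
      obtain ⟨hx, hy⟩ := hp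
      subst hx; subst hy
      have : [a, b].isPrefixOf (b :: r) = false := by
        cases r <;> simp [List.isPrefixOf, hab]
      simp [pvOcc, List.isPrefixOf]
      exact fun h => absurd h hab
lemma pv_H3 (x y z : Char) (hxy : x ≠ y) (hxz : x ≠ z) :
    ∀ l, [x, y, z].isPrefixOf l = true → pvOcc [x, y, z] l = 1 + pvOcc [x, y, z] (l.drop 3) := by
  intro l hp
  match l with
  | [] => simp [List.isPrefixOf] at hp
  | [c] => simp [List.isPrefixOf] at hp
  | [c, d] => simp [List.isPrefixOf] at hp
  | c :: d :: e :: r =>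
      simp [List.isPrefixOf] at hp
      obtain ⟨hc, hd, he⟩ := hp
      subst hc; subst hd; subst he
      have h1 : [x, y, z].isPrefixOf (y :: z :: r) = false := by
        simp [List.isPrefixOf, hxy]
      have h2 : [x, y, z].isPrefixOf (z :: r) = false := by
        cases r <;> simp [List.isPrefixOf, hxz]
      simp [pvOcc, List.isPrefixOf, hxy, hxz]

lemma pv_loopA : ∀ (cs : List Char) (n : Int) (b : Bool),
    (cs.foldl pvStepA (n, if b then ['0'] else [])).1 = n + pvZ cs b := by
  intro cs
  induction cs with
  | nil => intro n b; simp [pvZ]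
  | cons c t ih =>
      intro n b
      by_cases hc : c = '0'
      · subst hc
        cases b
        · have : pvStepA (n, if false then ['0'] else []) '0' = (n, if true then ['0'] else []) := by
            simp [pvStepA]
          rw [List.foldl_cons, this, ih]
          simp [pvZ]
        · have : pvStepA (n, if true then ['0'] else []) '0' = (n + 1, if true then ['0'] else []) := by
            simp [pvStepA]
          rw [List.foldl_cons, this, ih]
          simp [pvZ]; omega
      · have : pvStepA (n, if b then ['0'] else []) c = (n, if false then ['0'] else []) := by
          cases b <;> simp [pvStepA, hc]
        rw [List.foldl_cons, this, ih]
        have : (c == '0') = false := by simp [hc]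
        simp [pvZ, hc, this]

lemma pv_prefix00 (c : Char) (t : List Char) :
    ['0', '0'].isPrefixOf (c :: t) = (decide (c = '0') && decide (t.head? = some '0')) := by
  cases t <;> simp [List.isPrefixOf, Bool.beq_comm, beq_eq_decide]

lemma pv_Z_eq_occ : ∀ (cs : List Char) (b : Bool),
    pvZ cs b = (if b ∧ cs.head? = some '0' then 1 else 0) + (pvOcc ['0', '0'] cs : Int) := by
  intro cs
  induction cs with
  | nil => intro b; simp [pvZ, pvOcc]
  | cons c t ih =>
      intro b
      rw [pvZ, ih (c == '0')]
      rw [show pvOcc ['0','0'] (c :: t) = (if ['0','0'].isPrefixOf (c :: t) then 1 else 0) + pvOcc ['0','0'] t from rfl]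
      rw [pv_prefix00]
      by_cases hc : c = '0' <;> by_cases ht : t.head? = some '0' <;>
        simp [hc, ht]

lemma pv_pfx_head (a : Char) (p l : List Char) (h : (a :: p).isPrefixOf l = true) :
    l.head? = some a := by
  cases l <;> simp_all [List.isPrefixOf]

lemma pv_excl_01_00 (l : List Char) :
    ¬(['0', '1'].isPrefixOf l = true ∧ ['0', '0'].isPrefixOf l = true) := by
  rintro ⟨h1, h2⟩
  match l with
  | [] => simp [List.isPrefixOf] at h1
  | [x] => simp [List.isPrefixOf] at h1
  | x :: y :: r =>
      simp [List.isPrefixOf] at h1 h2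
      obtain ⟨-, hy1⟩ := h1
      obtain ⟨-, hy0⟩ := h2
      exact absurd (hy0.trans hy1.symm) (by decide)

lemma pv_cons_arith (b1 b2 b3 b4 : Bool) (n1 n2 n3 n4 : Nat) (h12 : ¬(b1 = true ∧ b2 = true))
    (h13 : ¬(b1 = true ∧ b3 = true)) (h14 : ¬(b1 = true ∧ b4 = true))
    (h23 : ¬(b2 = true ∧ b3 = true)) (h24 : ¬(b2 = true ∧ b4 = true))
    (h34 : ¬(b3 = true ∧ b4 = true)) :
    (if (b1 || b2 || b3 || b4) = true then 1 else 0) + (n1 + n2 + n3 + n4)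
      = (if b1 = true then 1 else 0) + n1 + ((if b2 = true then 1 else 0) + n2)
          + ((if b3 = true then 1 else 0) + n3) + ((if b4 = true then 1 else 0) + n4) := by
  cases b1 <;> cases b2 <;> cases b3 <;> cases b4 <;> simp_all <;> omega

lemma pv_occAll_split : ∀ cs, pvOccAll cs
    = pvOcc ['0', '1'] cs + pvOcc ['A', 'B', 'C'] cs + pvOcc ['H', 'O'] cs + pvOcc ['0', '0'] cs := by
  intro cs
  induction cs with
  | nil => simp [pvOccAll, pvOcc]
  | cons c t ih =>
      have e : ∀ p : List Char, pvOcc p (c :: t)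
          = (if p.isPrefixOf (c :: t) then 1 else 0) + pvOcc p t := fun p => rfl
      rw [pvOccAll, ih, pvTest, e ['0','1'], e ['A','B','C'], e ['H','O'], e ['0','0']]
      simp only [PySem.Chars.startswith]
      have x12 : ¬(['0','1'].isPrefixOf (c :: t) = true ∧ ['A','B','C'].isPrefixOf (c :: t) = true) := by
        rintro ⟨u, v⟩
        have := pv_pfx_head _ _ _ u; have := pv_pfx_head _ _ _ v; simp_all
      have x13 : ¬(['0','1'].isPrefixOf (c :: t) = true ∧ ['H','O'].isPrefixOf (c :: t) = true) := by
        rintro ⟨u, v⟩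
        have := pv_pfx_head _ _ _ u; have := pv_pfx_head _ _ _ v; simp_all
      have x14 := pv_excl_01_00 (c :: t)
      have x23 : ¬(['A','B','C'].isPrefixOf (c :: t) = true ∧ ['H','O'].isPrefixOf (c :: t) = true) := by
        rintro ⟨u, v⟩
        have := pv_pfx_head _ _ _ u; have := pv_pfx_head _ _ _ v; simp_all
      have x24 : ¬(['A','B','C'].isPrefixOf (c :: t) = true ∧ ['0','0'].isPrefixOf (c :: t) = true) := by
        rintro ⟨u, v⟩
        have := pv_pfx_head _ _ _ u; have := pv_pfx_head _ _ _ v; simp_all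
      have x34 : ¬(['H','O'].isPrefixOf (c :: t) = true ∧ ['0','0'].isPrefixOf (c :: t) = true) := by
        rintro ⟨u, v⟩
        have := pv_pfx_head _ _ _ u; have := pv_pfx_head _ _ _ v; simp_all
      exact pv_cons_arith _ _ _ _ _ _ _ _ x12 x13 x14 x23 x24 x34

lemma pv_countP_range : ∀ cs : List Char,
    (List.range cs.length).countP (fun i => pvTest (cs.drop i)) = pvOccAll cs := by
  intro cs
  induction cs with
  | nil => simp [pvOccAll]
  | cons c t ih =>
      rw [List.length_cons, List.range_succ_eq_map, List.countP_cons, List.countP_map]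
      rw [pvOccAll]
      have : (List.range t.length).countP ((fun i => pvTest ((c :: t).drop i)) ∘ Nat.succ)
          = (List.range t.length).countP (fun i => pvTest (t.drop i)) := by
        apply List.countP_congr
        intro i _
        simp
      rw [this, ih]
      by_cases h : pvTest (c :: t) = true <;> simp [h] <;> omega

lemma pv_alt_eq (st : String) :
    comboNum_alt st = (pvOccAll st.toList : Int) := by
  rw [comboNum_alt, PySem.Str.len_eq, PySem.List.pyRange_zero_natCast, List.foldl_map]
  have hfun : (fun (tot : Int) (k : Nat) =>
      if PySem.Chars.startswith (st.toList.drop ((k : Int)).toNat) ['0', '1']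
          || PySem.Chars.startswith (st.toList.drop ((k : Int)).toNat) ['A', 'B', 'C']
          || PySem.Chars.startswith (st.toList.drop ((k : Int)).toNat) ['H', 'O']
          || PySem.Chars.startswith (st.toList.drop ((k : Int)).toNat) ['0', '0']
      then tot + 1 else tot)
      = fun (tot : Int) (k : Nat) => if pvTest (st.toList.drop k) then tot + 1 else tot := by
    funext tot k
    simp [pvTest]
  rw [hfun, PySem.List.foldl_if_add_one (p := fun k : Nat => pvTest (st.toList.drop k)),
    pv_countP_range]
  simp

lemma pv_loopA_nil (cs : List Char) (n : Int) :
    (cs.foldl pvStepA (n, ([] : List Char))).1 = n + pvZ cs false := by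
  simpa using pv_loopA cs n false

lemma pv_Z_false (cs : List Char) : pvZ cs false = (pvOcc ['0', '0'] cs : Int) := by
  simpa using pv_Z_eq_occ cs false

-- ===== VERDICT (by name: the statement is the Claim_ definition above) =====
theorem comboNum_spec : Claim_equal_comboNum := by
  intro st _
  unfold Spec_comboNum
  rw [pv_alt_eq, pv_occAll_split]
  simp only [comboNum]
  rw [pv_loopA_nil, pv_Z_false]
  have h01 : PySem.Str.count st "01" = pvOcc ['0', '1'] st.toList := by
    rw [PySem.Str.count, show "01".toList = ['0', '1'] from by decide]
    exact pv_count_eq _ (by decide) (pv_H2 '0' '1' (by decide)) _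
  have hABC : PySem.Str.count st "ABC" = pvOcc ['A', 'B', 'C'] st.toList := by
    rw [PySem.Str.count, show "ABC".toList = ['A', 'B', 'C'] from by decide]
    exact pv_count_eq _ (by decide) (pv_H3 'A' 'B' 'C' (by decide) (by decide)) _
  have hHO : PySem.Str.count st "HO" = pvOcc ['H', 'O'] st.toList := by
    rw [PySem.Str.count, show "HO".toList = ['H', 'O'] from by decide]
    exact pv_count_eq _ (by decide) (pv_H2 'H' 'O' (by decide)) _
  rw [h01, hABC, hHO]
  push_cast
  ring
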